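-- pv_equiv track=rewrite | github.com/nlongname/AoC2021 | Day4/4.py | play_to_win
-- ===== SOURCE A (Python) =====
-- def winner_check(board_list:list) -> list: #check if there's a winner and return it; if not the empty list
--     for b in board_list:
--         if [] in b:
--             return b
--     return []
--
-- def play_to_win(nums:int, board_list:list) -> int:
--     winner = []
--     while winner == []:
--         current = nums.pop(0)
--         board_list = [[[int(x) for x in r if x != current] for r in b] for b in board_list]
--         winner = winner_check(board_list)
--     score = current * sum([sum(r) for r in winner])//2 #divide by 2 because we're double-counting w/ horiz and vert. lists
--     return score
-- ===== SOURCE B (Python) =====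
-- def play_to_win(nums, board_list):
--     # Closed-form reformulation (alternative algorithm): instead of simulating
--     # draws, compute for each number the index of its first draw, then for each
--     # line its completion time
--     # (max first-draw index of its elements), take the earliest-winning board,
--     # and score it directly.  (Return value only: A pops from nums in place.)
--     first = {}
--     for i, n in enumerate(nums):
--         if n not in first:
--             first[n] = i
--     inf = len(nums)  # "never drawn"
--     best_t = None
--     best_b = None
--     for bi, b in enumerate(board_list):
--         for line in b:
--             t = 0
--             for x in line:
--                 t = max(t, first.get(x, inf))
--             if t < inf and (best_t is None or t < best_t):
--                 best_t = t
--                 best_b = bi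
--     if best_t is None:
--         raise IndexError('no winning board within the draws')
--     current = nums[best_t]
--     unmarked = 0
--     for line in board_list[best_b]:
--         for x in line:
--             if first.get(x, inf) > best_t:
--                 unmarked += x
--     return current * unmarked // 2
-- ===== Notes on version B (the rewrite author's own statement) =====
-- stated objective: alternative
-- what changed: Replaces the draw-by-draw simulation (which rebuilds every board after each draw and rescans for a winner) by a closed-form computation: a first-draw-index dict per number, a completion time per line (max of its elements' first-draw indices), an argmin over boards picking the earliest/first winner, and direct scoring of that board; it trades A's repeated refiltering for one pass over the draws plus one pass over the board cells.
import Mathlib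
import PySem

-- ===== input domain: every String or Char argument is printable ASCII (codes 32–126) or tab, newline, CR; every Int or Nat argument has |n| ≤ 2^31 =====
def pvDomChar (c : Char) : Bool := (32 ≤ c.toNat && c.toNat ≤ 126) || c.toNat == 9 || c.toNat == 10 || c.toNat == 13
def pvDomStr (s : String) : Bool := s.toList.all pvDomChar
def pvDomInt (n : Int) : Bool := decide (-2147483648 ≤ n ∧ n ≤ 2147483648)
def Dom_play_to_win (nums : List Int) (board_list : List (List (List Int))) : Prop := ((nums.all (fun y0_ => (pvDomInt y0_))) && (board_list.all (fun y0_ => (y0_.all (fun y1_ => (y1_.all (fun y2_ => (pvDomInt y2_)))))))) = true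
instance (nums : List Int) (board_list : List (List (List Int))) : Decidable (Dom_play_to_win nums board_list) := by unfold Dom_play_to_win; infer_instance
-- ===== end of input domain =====

-- B replaces A's draw-by-draw simulation by a closed-form first-draw-index / line-completion-time
-- computation (an alternative algorithm); equivalence is about the RETURN value only: Python A pops
-- draws from nums in place.

-- ===== PORT A =====
-- winner_check: first board containing an empty row, else []
def winner_check (board_list : List (List (List Int))) : List (List Int) :=
  match board_list with
  | [] => []
  | b :: rest => if ([] : List Int) ∈ b then b else winner_check rest

-- [int(x) for x in r if x != current]  (int(x) is the identity on ints)
def pvFilterRow (c : Int) (r : List Int) : List Int :=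
  r.filter (fun x => decide (¬ x = c))

def pvStep (c : Int) (bl : List (List (List Int))) : List (List (List Int)) :=
  bl.map (fun b => b.map (pvFilterRow c))

-- the while-loop: pop a draw, filter all boards, check for a winner; none = IndexError (nums exhausted)
def pvLoopA : List Int → List (List (List Int)) → Option (Int × List (List Int))
  | [], _ => none
  | c :: rest, bl =>
    let bl' := pvStep c bl
    let w := winner_check bl'
    if w = [] then pvLoopA rest bl' else some (c, w)

def play_to_win (nums : List Int) (board_list : List (List (List Int))) : Int :=
  match pvLoopA nums board_list with
  | none => 0  -- nums.pop(0) raised IndexError: excluded by Pre_play_to_win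
  | some (c, w) => PySem.Int.floordiv (c * (w.map (fun r => r.sum)).sum) 2

-- ===== PORT B =====
-- first-draw index of each number (first wins on duplicates)
def altFirst (nums : List Int) : PySem.Dict Int Int :=
  (PySem.List.enumerate nums 0).foldl
    (fun d p => if d.contains p.2 then d else d.insert p.2 p.1) PySem.Dict.empty

-- body of B's candidate loop: fold the line's completion time, keep it if strictly better
def altStep (first : PySem.Dict Int Int) (inf : Int) (k : Int)
    (best : Option (Int × Int)) (line : List Int) : Option (Int × Int) :=
  let t := line.foldl (fun t x => max t (first.getD x inf)) 0
  if (decide (t < inf) && (match best with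
                           | none => true
                           | some q => decide (t < q.1)))
  then some (t, k) else best

def play_to_win_alt (nums : List Int) (board_list : List (List (List Int))) : Int :=
  let first := altFirst nums
  let inf : Int := (nums.length : Int)
  let best :=
    (PySem.List.enumerate board_list 0).foldl
      (fun best p => p.2.foldl (altStep first inf p.1) best)
      none
  match best with
  | none => 0  -- Python B raises IndexError here: excluded by Pre_play_to_win
  | some (t, bi) =>
    let current := PySem.List.pyGetD nums t 0
    let board := PySem.List.pyGetD board_list bi []
    let unmarked := board.foldl
      (fun s line => line.foldl (fun s x => if first.getD x inf > t then s + x else s) s) 0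
    PySem.Int.floordiv (current * unmarked) 2

-- ===== PRECONDITION & SPEC =====
-- Pre_ excludes exactly the inputs on which A raises IndexError (nums runs out before any board
-- completes a line): some board must have a line all of whose entries occur among the draws.
def Pre_play_to_win (nums : List Int) (board_list : List (List (List Int))) : Prop :=
  nums ≠ [] ∧ ∃ b ∈ board_list, ∃ r ∈ b, ∀ x ∈ r, x ∈ nums
instance (nums : List Int) (board_list : List (List (List Int))) : Decidable (Pre_play_to_win nums board_list) := by unfold Pre_play_to_win; infer_instance

def pvWitness_play_to_win : List Int × List (List (List Int)) := ([1, 2], [[[1], [2]]])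

def Spec_play_to_win (nums : List Int) (board_list : List (List (List Int))) (out : Int) : Prop := out = play_to_win_alt nums board_list
instance (nums : List Int) (board_list : List (List (List Int))) (out : Int) : Decidable (Spec_play_to_win nums board_list out) := by unfold Spec_play_to_win; infer_instance

-- ===== CLAIM (what is proved, stated in full; the proofs are below) =====
def Claim_equal_play_to_win : Prop := ∀ (nums : List Int) (board_list : List (List (List Int))), Dom_play_to_win nums board_list → Pre_play_to_win nums board_list → Spec_play_to_win nums board_list (play_to_win nums board_list)

-- ===== LEMMAS AND PROOFS =====

-- fI ds x: index of the first occurrence of x in ds, or ds.length if absent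
def fI : List Int → Int → Int
  | [], _ => 0
  | c :: rest, x => if x = c then 0 else fI rest x + 1

-- line completion time: max of first-draw indices over the line (0 for an empty line)
def lT (ds : List Int) (r : List Int) : Int :=
  r.foldl (fun t x => max t (fI ds x)) 0

-- one candidate step of B's argmin fold (with fI substituted for the dict lookup)
def stepB (ds : List Int) (k : Int) (acc : Option (Int × Int)) (r : List Int) : Option (Int × Int) :=
  let t := lT ds r
  if (decide (t < (ds.length : Int)) && (match acc with
                                         | none => true
                                         | some q => decide (t < q.1)))
  then some (t, k) else acc

-- B's double fold, recursively over the boards with explicit running index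
def bFrom (ds : List Int) : List (List (List Int)) → Int → Option (Int × Int) → Option (Int × Int)
  | [], _, acc => acc
  | b :: bs, k, acc => bFrom ds bs (k + 1) (b.foldl (stepB ds k) acc)

theorem fI_nonneg (ds : List Int) (x : Int) : 0 ≤ fI ds x := by
  induction ds with
  | nil => simp [fI]
  | cons c rest ih => simp only [fI]; split <;> omega

theorem fI_of_not_mem (ds : List Int) (x : Int) (h : x ∉ ds) : fI ds x = (ds.length : Int) := by
  induction ds with
  | nil => simp [fI]
  | cons c rest ih =>
    simp only [List.mem_cons, not_or] at h
    simp only [fI, if_neg h.1, ih h.2, List.length_cons]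
    push_cast; ring

theorem mem_take_iff (ds : List Int) (x : Int) :
    ∀ k : Nat, x ∈ ds.take (k + 1) ↔ (fI ds x ≤ (k : Int) ∧ x ∈ ds) := by
  induction ds with
  | nil => intro k; simp
  | cons c rest ih =>
    intro k
    by_cases hx : x = c
    · subst hx
      simp [List.take_succ_cons, fI]
    · have hfi := fI_nonneg rest x
      cases k with
      | zero =>
        simp [List.take_succ_cons, fI, hx]
        omega
      | succ m =>
        have := ih m
        simp [List.take_succ_cons, fI, hx] at this ⊢
        constructor
        · intro hm; rcases this.mp hm with ⟨h1, h2⟩; exact ⟨by omega, h2⟩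
        · rintro ⟨h1, h2⟩; exact this.mpr ⟨by omega, h2⟩

theorem lT_nonneg (ds : List Int) (r : List Int) : 0 ≤ lT ds r := by
  exact (PySem.List.le_foldl_max_int r (fun x => fI ds x) 0).1

theorem lT_zero (c : Int) (rest : List Int) (r : List Int) (h : pvFilterRow c r = []) :
    lT (c :: rest) r = 0 := by
  induction r with
  | nil => simp [lT]
  | cons x xs ih =>
    have hx : x = c ∧ pvFilterRow c xs = [] := by
      by_cases hxc : x = c
      · refine ⟨hxc, ?_⟩
        simpa [pvFilterRow, List.filter_cons, hxc] using h
      · exfalso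
        simp [pvFilterRow, List.filter_cons, hxc] at h
    have := ih hx.2
    simp only [lT, List.foldl_cons] at this ⊢
    rw [hx.1]
    simpa [fI] using this

theorem foldl_fI_cons (c : Int) (rest : List Int) :
    ∀ (r : List Int) (a : Int), 0 ≤ a →
      r.foldl (fun t x => max t (fI (c :: rest) x)) a
        = (pvFilterRow c r).foldl (fun t x => max t (fI rest x + 1)) a := by
  intro r
  induction r with
  | nil => intro a _; simp [pvFilterRow]
  | cons x xs ih =>
    intro a ha
    by_cases hx : x = c
    · subst hx
      have : max a (fI (x :: rest) x) = a := by simp [fI]; omega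
      simp only [List.foldl_cons, pvFilterRow, List.filter_cons, decide_eq_true_eq]
      simp only [not_true_eq_false, decide_false]
      simpa [pvFilterRow, this] using ih a ha
    · have hfi := fI_nonneg rest x
      simp only [List.foldl_cons, pvFilterRow, List.filter_cons, decide_eq_true_eq]
      simp only [hx, not_false_eq_true, decide_true, List.foldl_cons]
      have h2 : fI (c :: rest) x = fI rest x + 1 := by simp [fI, hx]
      rw [h2]
      exact ih (max a (fI rest x + 1)) (by omega)

theorem foldl_max_succ (f : Int → Int) :
    ∀ (r : List Int) (a : Int),
      r.foldl (fun t x => max t (f x + 1)) (a + 1) = r.foldl (fun t x => max t (f x)) a + 1 := by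
  intro r
  induction r with
  | nil => intro a; simp
  | cons x xs ih =>
    intro a
    simp only [List.foldl_cons]
    have : max (a + 1) (f x + 1) = max a (f x) + 1 := by omega
    rw [this, ih]

theorem lT_shift (c : Int) (rest : List Int) (r : List Int) (h : pvFilterRow c r ≠ []) :
    lT (c :: rest) r = lT rest (pvFilterRow c r) + 1 := by
  obtain ⟨y, ys, hys⟩ := List.exists_cons_of_ne_nil h
  have hy := fI_nonneg rest y
  simp only [lT, foldl_fI_cons c rest r 0 le_rfl, hys, List.foldl_cons]
  have h1 : max 0 (fI rest y + 1) = fI rest y + 1 := by omega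
  have h2 : max 0 (fI rest y) = fI rest y := by omega
  rw [h1, h2, foldl_max_succ]

theorem lT0_iff (c : Int) (rest : List Int) (r : List Int) :
    lT (c :: rest) r = 0 ↔ pvFilterRow c r = [] := by
  constructor
  · intro h
    by_contra hne
    have := lT_shift c rest r hne
    have := lT_nonneg rest (pvFilterRow c r)
    omega
  · exact lT_zero c rest r

-- accOK: every stored candidate has strictly positive time
def accOK (acc : Option (Int × Int)) : Prop := ∀ t j, acc = some (t, j) → 0 < t

theorem stepB_absorb (ds : List Int) (k j : Int) (r : List Int) :
    stepB ds k (some (0, j)) r = some (0, j) := by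
  have h0 := lT_nonneg ds r
  have h : ¬ lT ds r < (0:Int) := by omega
  simp [stepB, h]

theorem stepB_accOK (ds : List Int) (k : Int) (r : List Int) (acc : Option (Int × Int))
    (hz : lT ds r ≠ 0) (hacc : accOK acc) : accOK (stepB ds k acc r) := by
  have hlt := lT_nonneg ds r
  intro t j hj
  cases acc with
  | none =>
    simp only [stepB] at hj
    split at hj
    · simp only [Option.some.injEq, Prod.mk.injEq] at hj
      omega
    · exact absurd hj (by simp)
  | some q =>
    obtain ⟨tq, jq⟩ := q
    have hq : 0 < tq := hacc tq jq rfl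
    simp only [stepB] at hj
    split at hj
    · simp only [Option.some.injEq, Prod.mk.injEq] at hj
      omega
    · simp only [Option.some.injEq, Prod.mk.injEq] at hj
      omega

theorem foldl_stepB_absorb (ds : List Int) (k j : Int) (b : List (List Int)) :
    b.foldl (stepB ds k) (some (0, j)) = some (0, j) := by
  induction b with
  | nil => rfl
  | cons r rs ih => simp only [List.foldl_cons, stepB_absorb, ih]

theorem bFrom_absorb (ds : List Int) (j : Int) :
    ∀ (bl : List (List (List Int))) (k : Int), bFrom ds bl k (some (0, j)) = some (0, j) := by
  intro bl
  induction bl with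
  | nil => intro k; rfl
  | cons b bs ih => intro k; simp only [bFrom, foldl_stepB_absorb, ih]

def hzB (ds : List Int) (b : List (List Int)) : Bool := b.any (fun r => lT ds r == 0)

theorem fold_zero_line (ds : List Int) (k : Int) (hL : 0 < (ds.length : Int)) :
    ∀ (b : List (List Int)) (acc : Option (Int × Int)), accOK acc → (∃ r ∈ b, lT ds r = 0) →
      b.foldl (stepB ds k) acc = some (0, k) := by
  intro b
  induction b with
  | nil => rintro acc _ ⟨r, hr, _⟩; exact absurd hr (List.not_mem_nil)
  | cons r rs ih =>
    rintro acc hacc ⟨r0, hr0, h0⟩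
    by_cases hz : lT ds r = 0
    · have hstep : stepB ds k acc r = some (0, k) := by
        cases acc with
        | none =>
          simp only [stepB, hz]
          rw [decide_eq_true hL]
          rfl
        | some q =>
          obtain ⟨t, j⟩ := q
          have hq : 0 < t := hacc t j rfl
          simp only [stepB, hz]
          rw [decide_eq_true hL, decide_eq_true hq]
          rfl
      simp only [List.foldl_cons, hstep, foldl_stepB_absorb]
    · have hacc' : accOK (stepB ds k acc r) := stepB_accOK ds k r acc hz hacc
      have hmem : ∃ r' ∈ rs, lT ds r' = 0 := by
        rcases List.mem_cons.mp hr0 with h | h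
        · exact absurd (h ▸ h0) hz
        · exact ⟨r0, h, h0⟩
      simp only [List.foldl_cons]
      exact ih _ hacc' hmem

theorem foldl_stepB_accOK (ds : List Int) (k : Int) (b : List (List Int))
    (h : ∀ r ∈ b, lT ds r ≠ 0) :
    ∀ acc, accOK acc → accOK (b.foldl (stepB ds k) acc) := by
  induction b with
  | nil => intro acc hacc; exact hacc
  | cons r rs ih =>
    intro acc hacc
    have hacc' : accOK (stepB ds k acc r) := stepB_accOK ds k r acc (h r List.mem_cons_self) hacc
    simp only [List.foldl_cons]
    exact ih (fun r' hr' => h r' (List.mem_cons_of_mem _ hr')) _ hacc'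

theorem bFrom_zero (ds : List Int) (hL : 0 < (ds.length : Int)) :
    ∀ (bl : List (List (List Int))) (k : Int) (acc : Option (Int × Int)), accOK acc →
      bl.any (hzB ds) = true →
      bFrom ds bl k acc = some (0, k + (bl.findIdx (hzB ds) : Int)) := by
  intro bl
  induction bl with
  | nil => intro k acc _ h; simp at h
  | cons b bs ih =>
    intro k acc hacc hany
    by_cases hb : hzB ds b = true
    · obtain ⟨r, hr, h0⟩ := by
        simpa [hzB, List.any_eq_true, beq_iff_eq] using hb
      simp only [bFrom, fold_zero_line ds k hL b acc hacc ⟨r, hr, h0⟩, bFrom_absorb,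
        List.findIdx_cons, hb, cond_true]
      simp
    · have hbs : bs.any (hzB ds) = true := by
        rcases List.any_eq_true.mp hany with ⟨b', hb', h'⟩
        rcases List.mem_cons.mp hb' with h | h
        · exact absurd (h ▸ h') hb
        · exact List.any_eq_true.mpr ⟨b', h, h'⟩
      have hlines : ∀ r ∈ b, lT ds r ≠ 0 := by
        intro r hr h0
        exact hb (by simp [hzB, List.any_eq_true]; exact ⟨r, hr, h0⟩)
      have hacc' := foldl_stepB_accOK ds k b hlines acc hacc
      simp only [bFrom, ih (k + 1) _ hacc' hbs, List.findIdx_cons, hb, cond_false]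
      congr 1
      push_cast
      ring

theorem foldl_stepB_nil (k : Int) (b : List (List Int)) (acc : Option (Int × Int)) :
    b.foldl (stepB [] k) acc = acc := by
  induction b with
  | nil => rfl
  | cons r rs ih =>
    have hlt := lT_nonneg [] r
    have hstep : stepB [] k acc r = acc := by
      cases acc with
      | none => simp [stepB]; omega
      | some q => simp [stepB]; intro h2; omega
    simp only [List.foldl_cons, hstep, ih]

theorem bFrom_nil_ds : ∀ (bl : List (List (List Int))) (k : Int) (acc : Option (Int × Int)),
    bFrom [] bl k acc = acc := by
  intro bl
  induction bl with
  | nil => intro k acc; rfl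
  | cons b bs ih => intro k acc; simp only [bFrom, foldl_stepB_nil, ih]

theorem foldl_stepB_shift (c : Int) (rest : List Int) (k : Int) (b : List (List Int))
    (hb : ∀ r ∈ b, pvFilterRow c r ≠ []) :
    ∀ accR : Option (Int × Int),
      b.foldl (stepB (c :: rest) k) (accR.map (fun q => (q.1 + 1, q.2)))
        = (b.foldl (fun a r => stepB rest k a (pvFilterRow c r)) accR).map (fun q => (q.1 + 1, q.2)) := by
  induction b with
  | nil => intro accR; rfl
  | cons r rs ih =>
    intro accR
    have hr := hb r List.mem_cons_self
    have hstep : stepB (c :: rest) k (accR.map (fun q => (q.1 + 1, q.2))) r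
        = (stepB rest k accR (pvFilterRow c r)).map (fun q => (q.1 + 1, q.2)) := by
      have hsh := lT_shift c rest r hr
      have hlen : ((c :: rest).length : Int) = (rest.length : Int) + 1 := by
        simp
      cases accR with
      | none =>
        simp only [stepB, Option.map_none, hsh, hlen]
        have : decide (lT rest (pvFilterRow c r) + 1 < (rest.length : Int) + 1)
            = decide (lT rest (pvFilterRow c r) < (rest.length : Int)) := by
          rcases Classical.em (lT rest (pvFilterRow c r) < (rest.length : Int)) with h | h
          · rw [decide_eq_true (by omega), decide_eq_true h]
          · rw [decide_eq_false (by omega), decide_eq_false h]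
        rw [this]
        split <;> simp
      | some q =>
        obtain ⟨tq, jq⟩ := q
        simp only [stepB, Option.map_some, hsh, hlen]
        have h1 : decide (lT rest (pvFilterRow c r) + 1 < (rest.length : Int) + 1)
            = decide (lT rest (pvFilterRow c r) < (rest.length : Int)) := by
          rcases Classical.em (lT rest (pvFilterRow c r) < (rest.length : Int)) with h | h
          · rw [decide_eq_true (by omega), decide_eq_true h]
          · rw [decide_eq_false (by omega), decide_eq_false h]
        have h2 : decide (lT rest (pvFilterRow c r) + 1 < tq + 1)
            = decide (lT rest (pvFilterRow c r) < tq) := by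
          rcases Classical.em (lT rest (pvFilterRow c r) < tq) with h | h
          · rw [decide_eq_true (by omega), decide_eq_true h]
          · rw [decide_eq_false (by omega), decide_eq_false h]
        rw [h1, h2]
        split <;> simp
    simp only [List.foldl_cons, hstep]
    exact ih (fun r' h' => hb r' (List.mem_cons_of_mem _ h')) _

theorem bFrom_shift (c : Int) (rest : List Int) :
    ∀ (bl : List (List (List Int))), (∀ b ∈ bl, ∀ r ∈ b, pvFilterRow c r ≠ []) →
    ∀ (k : Int) (accR : Option (Int × Int)),
      bFrom (c :: rest) bl k (accR.map (fun q => (q.1 + 1, q.2)))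
        = (bFrom rest (pvStep c bl) k accR).map (fun q => (q.1 + 1, q.2)) := by
  intro bl
  induction bl with
  | nil => intro _ k accR; rfl
  | cons b bs ih =>
    intro hno k accR
    have hb : ∀ r ∈ b, pvFilterRow c r ≠ [] := hno b List.mem_cons_self
    have hmap : (b.map (pvFilterRow c)).foldl (stepB rest k) accR
        = b.foldl (fun a r => stepB rest k a (pvFilterRow c r)) accR := by
      rw [List.foldl_map]
    simp only [bFrom, pvStep, List.map_cons]
    rw [foldl_stepB_shift c rest k b hb accR, hmap]
    exact ih (fun b' h' => hno b' (List.mem_cons_of_mem _ h')) (k + 1) _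


theorem winner_check_eq_nil_iff (bl : List (List (List Int))) :
    winner_check bl = [] ↔ ∀ b ∈ bl, ([] : List Int) ∉ b := by
  induction bl with
  | nil => simp [winner_check]
  | cons b bs ih =>
    by_cases hb : ([] : List Int) ∈ b
    · simp only [winner_check, if_pos hb]
      constructor
      · intro h; exact absurd (h ▸ hb) (List.not_mem_nil)
      · intro h; exact absurd hb (h b List.mem_cons_self)
    · simp only [winner_check, if_neg hb, ih]
      constructor
      · intro h b' hb'
        rcases List.mem_cons.mp hb' with h' | h'
        · exact h' ▸ hb
        · exact h b' h'
      · intro h b' hb'; exact h b' (List.mem_cons_of_mem _ hb')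

theorem winner_check_eq_of_found :
    ∀ (bl : List (List (List Int))), (∃ b ∈ bl, ([] : List Int) ∈ b) →
      winner_check bl = bl.getD (bl.findIdx (fun b => decide (([] : List Int) ∈ b))) [] := by
  intro bl
  induction bl with
  | nil => rintro ⟨b, hb, _⟩; exact absurd hb (List.not_mem_nil)
  | cons b bs ih =>
    rintro ⟨b', hb', h'⟩
    by_cases hb : ([] : List Int) ∈ b
    · simp [winner_check, if_pos hb, List.findIdx_cons, hb]
    · have : b' ∈ bs := by
        rcases List.mem_cons.mp hb' with h | h
        · exact absurd (h ▸ h') hb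
        · exact h
      simp only [winner_check, if_neg hb, List.findIdx_cons, decide_eq_false hb, cond_false,
        List.getD_cons_succ]
      exact ih ⟨b', this, h'⟩

theorem findIdx_map' {α β : Type} (f : α → β) (p : β → Bool) :
    ∀ l : List α, (l.map f).findIdx p = l.findIdx (fun x => p (f x)) := by
  intro l
  induction l with
  | nil => simp
  | cons a l ih => simp [List.findIdx_cons, ih]

theorem row_filter_step (c : Int) (tk : List Int) (r : List Int) :
    (pvFilterRow c r).filter (fun x => decide (x ∉ tk)) = r.filter (fun x => decide (x ∉ c :: tk)) := by
  simp only [pvFilterRow, List.filter_filter]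
  apply List.filter_congr
  intro x _
  by_cases h1 : x = c <;> by_cases h2 : x ∈ tk <;> simp [h1, h2]

theorem getD_map_pvF (c : Int) (bl : List (List (List Int))) (m : Nat) :
    (bl.map (fun b => b.map (pvFilterRow c))).getD m [] = (bl.getD m []).map (pvFilterRow c) := by
  have := List.getD_map bl ([] : List (List Int)) (n := m) (fun b => b.map (pvFilterRow c))
  simpa using this

theorem hzB_pred (c : Int) (rest : List Int) (b : List (List Int)) :
    (decide (([] : List Int) ∈ b.map (pvFilterRow c))) = hzB (c :: rest) b := by
  by_cases h : ([] : List Int) ∈ b.map (pvFilterRow c)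
  · rw [decide_eq_true h]
    symm
    obtain ⟨r, hr, hre⟩ := List.mem_map.mp h
    simp only [hzB, List.any_eq_true, beq_iff_eq]
    exact ⟨r, hr, (lT0_iff c rest r).mpr hre⟩
  · rw [decide_eq_false h]
    have : hzB (c :: rest) b = false := by
      rw [← Bool.not_eq_true]
      intro hany
      obtain ⟨r, hr, h0⟩ := List.any_eq_true.mp hany
      exact h (List.mem_map.mpr ⟨r, hr, (lT0_iff c rest r).mp (beq_iff_eq.mp h0)⟩)
    rw [this]

-- main correspondence between A's loop and B's argmin fold
theorem loopA_main (ds : List Int) :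
    ∀ bl : List (List (List Int)),
      (bFrom ds bl 0 none = none → pvLoopA ds bl = none) ∧
      (∀ t bi, bFrom ds bl 0 none = some (t, bi) →
        0 ≤ t ∧ t < (ds.length : Int) ∧ 0 ≤ bi ∧ bi < (bl.length : Int) ∧
        pvLoopA ds bl = some (PySem.List.pyGetD ds t 0,
          (PySem.List.pyGetD bl bi []).map
            (fun r => r.filter (fun x => decide (x ∉ ds.take (t.toNat + 1)))))) := by
  induction ds with
  | nil =>
    intro bl
    refine ⟨fun _ => rfl, fun t bi h => ?_⟩
    rw [bFrom_nil_ds] at h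
    exact absurd h (by simp)
  | cons c rest ih =>
    intro bl
    by_cases hwin : winner_check (pvStep c bl) = []
    · -- no winner after this draw: shift
      have hno : ∀ b ∈ bl, ∀ r ∈ b, pvFilterRow c r ≠ [] := by
        intro b hb r hr hcon
        exact (winner_check_eq_nil_iff _).mp hwin (b.map (pvFilterRow c))
          (List.mem_map.mpr ⟨b, hb, rfl⟩) (List.mem_map.mpr ⟨r, hr, hcon⟩)
      have hshift : bFrom (c :: rest) bl 0 none
          = (bFrom rest (pvStep c bl) 0 none).map (fun q => (q.1 + 1, q.2)) := by
        have := bFrom_shift c rest bl hno 0 none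
        simpa using this
      have hloop : pvLoopA (c :: rest) bl = pvLoopA rest (pvStep c bl) := by
        simp only [pvLoopA]
        rw [if_pos hwin]
      obtain ⟨ih1, ih2⟩ := ih (pvStep c bl)
      refine ⟨fun h => ?_, fun t bi h => ?_⟩
      · rw [hloop]
        exact ih1 (Option.map_eq_none_iff.mp (hshift ▸ h))
      · rw [hshift] at h
        rcases hin : bFrom rest (pvStep c bl) 0 none with _ | ⟨t', bi'⟩
        · rw [hin] at h; exact absurd h (by simp)
        · rw [hin] at h
          simp only [Option.map_some, Option.some.injEq, Prod.mk.injEq] at h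
          obtain ⟨ht, hbi⟩ := h
          obtain ⟨h0, h1, h2, h3, h4⟩ := ih2 t' bi' hin
          have hlenS : ((pvStep c bl).length : Int) = (bl.length : Int) := by simp [pvStep]
          refine ⟨by omega, by simp only [List.length_cons]; push_cast; omega, by omega, by omega, ?_⟩
          rw [hloop, h4]
          have htn : t.toNat = t'.toNat + 1 := by omega
          have htt : t = ((t'.toNat + 1 : Nat) : Int) := by push_cast; omega
          have ht' : t' = ((t'.toNat : Nat) : Int) := by push_cast; omega
          have hbi' : bi' = ((bi'.toNat : Nat) : Int) := by push_cast; omega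
          congr 1
          refine Prod.ext ?_ ?_
          · -- drawn number
            show PySem.List.pyGetD rest t' 0 = PySem.List.pyGetD (c :: rest) t 0
            rw [htt, ht', PySem.List.pyGetD_natCast, PySem.List.pyGetD_natCast,
              List.getD_cons_succ]
            have he : ((t'.toNat : Int)).toNat = t'.toNat := by omega
            rw [he]
          · -- winner board
            show (PySem.List.pyGetD (pvStep c bl) bi' []).map
                (fun r => r.filter (fun x => decide (x ∉ rest.take (t'.toNat + 1))))
              = (PySem.List.pyGetD bl bi []).map
                (fun r => r.filter (fun x => decide (x ∉ (c :: rest).take (t.toNat + 1))))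
            rw [← hbi, hbi', PySem.List.pyGetD_natCast, PySem.List.pyGetD_natCast]
            simp only [pvStep, getD_map_pvF, List.map_map]
            rw [htn, List.take_succ_cons]
            apply List.map_congr_left
            intro r _
            exact row_filter_step c (rest.take (t'.toNat + 1)) r
    · -- a winner appears after this draw
      have hfound : ∃ b ∈ pvStep c bl, ([] : List Int) ∈ b := by
        by_contra hcon
        push_neg at hcon
        exact hwin ((winner_check_eq_nil_iff _).mpr hcon)
      have hany : bl.any (hzB (c :: rest)) = true := by
        obtain ⟨b', hb', h'⟩ := hfound
        obtain ⟨b, hb, hfb⟩ := List.mem_map.mp hb'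
        refine List.any_eq_true.mpr ⟨b, hb, ?_⟩
        rw [← hzB_pred c rest b]
        exact decide_eq_true (hfb ▸ h')
      have hL : 0 < ((c :: rest).length : Int) := by
        simp only [List.length_cons]; push_cast; omega
      have hz := bFrom_zero (c :: rest) hL bl 0 none
        (fun t j h => absurd h (by simp)) hany
      have hn : bl.findIdx (hzB (c :: rest)) < bl.length := by
        apply List.findIdx_lt_length_of_exists
        exact List.any_eq_true.mp hany
      have hwc := winner_check_eq_of_found _ hfound
      have hidx : (pvStep c bl).findIdx (fun b => decide (([] : List Int) ∈ b))
          = bl.findIdx (hzB (c :: rest)) := by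
        unfold pvStep
        rw [findIdx_map']
        congr 1
        funext b
        exact hzB_pred c rest b
      refine ⟨fun h => ?_, fun t bi h => ?_⟩
      · rw [hz] at h; exact absurd h (by simp)
      · rw [hz] at h
        simp only [Option.some.injEq, Prod.mk.injEq, zero_add] at h
        obtain ⟨ht, hbi⟩ := h
        refine ⟨by omega, by omega, by omega, by omega, ?_⟩
        have hloop : pvLoopA (c :: rest) bl = some (c, winner_check (pvStep c bl)) := by
          simp only [pvLoopA]
          rw [if_neg hwin]
        rw [hloop]
        congr 1
        refine Prod.ext ?_ ?_
        · show c = PySem.List.pyGetD (c :: rest) t 0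
          rw [← ht, PySem.List.pyGetD_zero_cons]
        · show winner_check (pvStep c bl)
            = (PySem.List.pyGetD bl bi []).map
                (fun r => r.filter (fun x => decide (x ∉ (c :: rest).take (t.toNat + 1))))
          rw [hwc, hidx]
          have hbn : bi = ((bl.findIdx (hzB (c :: rest)) : Nat) : Int) := by omega
          have htk : (c :: rest).take (t.toNat + 1) = [c] := by
            rw [← ht]
            simp
          rw [hbn, PySem.List.pyGetD_natCast, htk]
          simp only [pvStep, getD_map_pvF]
          apply List.map_congr_left
          intro r _
          unfold pvFilterRow
          apply List.filter_congr
          intro x _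
          simp

theorem first_aux (nums : List Int) :
    ∀ (s : Int) (d : PySem.Dict Int Int) (x : Int),
      ((PySem.List.enumerate nums s).foldl
          (fun d p => if d.contains p.2 then d else d.insert p.2 p.1) d).get? x
        = ((d.get? x).orElse (fun _ => if x ∈ nums then some (s + fI nums x) else none)) := by
  induction nums with
  | nil =>
    intro s d x
    simp [PySem.List.enumerate_nil]
  | cons c rest ih =>
    intro s d x
    rw [PySem.List.enumerate_cons, List.foldl_cons]
    by_cases hc : d.contains c = true
    · have hsome : (d.get? c).isSome := by
        rw [PySem.Dict.contains_eq_isSome_get?] at hc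
        exact hc
      rw [if_pos hc, ih (s + 1) d x]
      by_cases hx : x = c
      · subst hx
        obtain ⟨v, hv⟩ := Option.isSome_iff_exists.mp hsome
        simp [hv]
      · congr 1
        funext u
        by_cases hm : x ∈ rest
        · have hfi : fI (c :: rest) x = fI rest x + 1 := by simp [fI, hx]
          simp only [hm, if_true, List.mem_cons, hx, false_or, hfi]
          congr 1
          ring
        · have hnm : x ∉ (c :: rest) := by simp [hx, hm]
          simp [hm, hnm]
    · rw [if_neg hc, ih (s + 1) _ x]
      have hnone : d.get? c = none := by
        rw [PySem.Dict.get?_eq_none_iff_contains]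
        simpa using hc
      by_cases hx : x = c
      · subst hx
        rw [show (d.insert (s, x).2 (s, x).1) = d.insert x s from rfl,
          PySem.Dict.get?_insert_self, hnone]
        simp [fI]
      · rw [show (d.insert (s, c).2 (s, c).1) = d.insert c s from rfl,
          PySem.Dict.get?_insert_of_ne d s hx]
        congr 1
        funext u
        by_cases hm : x ∈ rest
        · have hfi : fI (c :: rest) x = fI rest x + 1 := by simp [fI, hx]
          simp only [hm, if_true, List.mem_cons, hx, false_or, hfi]
          congr 1
          ring
        · have hnm : x ∉ (c :: rest) := by simp [hx, hm]
          simp [hm, hnm]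

theorem first_getD (nums : List Int) (x : Int) :
    (altFirst nums).getD x (nums.length : Int) = fI nums x := by
  unfold altFirst
  rw [PySem.Dict.getD_eq_get?_getD, first_aux nums 0 PySem.Dict.empty x]
  by_cases hm : x ∈ nums
  · simp [PySem.Dict.get?_empty, hm]
  · simp [PySem.Dict.get?_empty, hm, fI_of_not_mem nums x hm]

theorem altStep_eq (ds : List Int) (k : Int) :
    altStep (altFirst ds) (ds.length : Int) k = stepB ds k := by
  funext best line
  cases best <;> simp only [altStep, stepB, first_getD, lT]
  all_goals rfl

theorem foldB_eq_bFrom (ds : List Int) :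
    ∀ (bl : List (List (List Int))) (s : Int) (acc : Option (Int × Int)),
      (PySem.List.enumerate bl s).foldl
        (fun best p => p.2.foldl (altStep (altFirst ds) (ds.length : Int) p.1) best)
        acc = bFrom ds bl s acc := by
  intro bl
  induction bl with
  | nil => intro s acc; rfl
  | cons b bs ih =>
    intro s acc
    rw [PySem.List.enumerate_cons, List.foldl_cons, ih (s + 1)]
    show bFrom ds bs (s + 1) (b.foldl (altStep (altFirst ds) (ds.length : Int) s) acc)
      = bFrom ds bs (s + 1) (b.foldl (stepB ds s) acc)
    rw [altStep_eq ds s]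

theorem filter_pred_eq (nums : List Int) (t x : Int) (h0 : 0 ≤ t) (h1 : t < (nums.length : Int)) :
    decide (x ∉ nums.take (t.toNat + 1)) = decide (t < fI nums x) := by
  have hm := mem_take_iff nums x t.toNat
  have hnn := fI_nonneg nums x
  rw [Int.toNat_of_nonneg h0] at hm
  rw [decide_eq_decide]
  by_cases hx : x ∈ nums
  · constructor
    · intro hnt
      by_contra hle
      exact hnt (hm.mpr ⟨by omega, hx⟩)
    · intro hlt hin
      have := (hm.mp hin).1
      omega
  · have hfi := fI_of_not_mem nums x hx
    constructor
    · intro _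
      omega
    · intro _ hin
      exact hx (hm.mp hin).2

theorem innerSumEq (nums : List Int) (t : Int) (s : Int) (line : List Int) :
    line.foldl (fun s x => if fI nums x > t then s + x else s) s
      = s + (line.filter (fun x => decide (t < fI nums x))).sum := by
  rw [PySem.List.foldl_ite_eq_foldl_filter (fun x => t < fI nums x) (fun acc x => acc + x) line s]
  have := PySem.List.foldl_add (line.filter (fun x => decide (t < fI nums x))) (fun x => x) s
  simpa using this

theorem ports_agree (nums : List Int) (bl : List (List (List Int))) :
    play_to_win nums bl = play_to_win_alt nums bl := by
  obtain ⟨m1, m2⟩ := loopA_main nums bl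
  have hB : play_to_win_alt nums bl
      = (match bFrom nums bl 0 none with
        | none => 0
        | some (t, bi) =>
          PySem.Int.floordiv (PySem.List.pyGetD nums t 0 *
            ((PySem.List.pyGetD bl bi []).foldl
              (fun s line => line.foldl (fun s x => if fI nums x > t then s + x else s) s) 0)) 2) := by
    simp only [play_to_win_alt, first_getD]
    rw [foldB_eq_bFrom nums bl 0 none]
    rfl
  rw [hB]
  rcases h : bFrom nums bl 0 none with _ | ⟨t, bi⟩
  · simp only [play_to_win, m1 h]
  · obtain ⟨h0, h1, h2, h3, h4⟩ := m2 t bi h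
    simp only [play_to_win, h4]
    congr 2
    -- the two unmarked sums agree
    have hinner : (fun (s : Int) (line : List Int) =>
          line.foldl (fun s x => if fI nums x > t then s + x else s) s)
        = fun (s : Int) (line : List Int) => s + (line.filter (fun x => decide (t < fI nums x))).sum := by
      funext s line
      exact innerSumEq nums t s line
    rw [hinner, PySem.List.foldl_add (PySem.List.pyGetD bl bi [])
      (fun line => (line.filter (fun x => decide (t < fI nums x))).sum) 0, List.map_map]
    simp only [zero_add]
    congr 1
    apply List.map_congr_left
    intro r _
    show (r.filter (fun x => decide (x ∉ nums.take (t.toNat + 1)))).sum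
      = (r.filter (fun x => decide (t < fI nums x))).sum
    congr 1
    apply List.filter_congr
    intro x _
    exact filter_pred_eq nums t x h0 h1

-- ===== VERDICT (by name: the statement is the Claim_ definition above) =====
theorem play_to_win_spec : Claim_equal_play_to_win := by
  intro nums bl _ _
  unfold Spec_play_to_win
  exact ports_agree nums bl
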